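-- pv_equiv track=rewrite | github.com/om2k13/Shitttttt2.0 | backend/test_code_samples/vulnerable_code.py | process_item
-- ===== SOURCE A (Python) =====
-- def process_item(item, options, flags):
--     # More complexity
--     total = 0
--     for i in range(100):
--         if i % 2 == 0:
--             if options.get('double'):
--                 total += i * 2
--             else:
--                 total += i
--         else:
--             if flags.get('triple'):
--                 total += i * 3
--             else:
--                 total += i
--     return total
-- ===== SOURCE B (Python) =====
-- def process_item(item, options, flags):
--     even_sum = sum(range(0, 100, 2))
--     odd_sum = sum(range(1, 100, 2))
--     return even_sum * (2 if options.get('double') else 1) + odd_sum * (3 if flags.get('triple') else 1)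
-- ===== Notes on version B (the rewrite author's own statement) =====
-- stated objective: simpler
-- what changed: Replaces the 100-iteration branching loop with two aggregate sums over the even and odd indices, scaled once by the loop-invariant option/flag truthiness.
import Mathlib
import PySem

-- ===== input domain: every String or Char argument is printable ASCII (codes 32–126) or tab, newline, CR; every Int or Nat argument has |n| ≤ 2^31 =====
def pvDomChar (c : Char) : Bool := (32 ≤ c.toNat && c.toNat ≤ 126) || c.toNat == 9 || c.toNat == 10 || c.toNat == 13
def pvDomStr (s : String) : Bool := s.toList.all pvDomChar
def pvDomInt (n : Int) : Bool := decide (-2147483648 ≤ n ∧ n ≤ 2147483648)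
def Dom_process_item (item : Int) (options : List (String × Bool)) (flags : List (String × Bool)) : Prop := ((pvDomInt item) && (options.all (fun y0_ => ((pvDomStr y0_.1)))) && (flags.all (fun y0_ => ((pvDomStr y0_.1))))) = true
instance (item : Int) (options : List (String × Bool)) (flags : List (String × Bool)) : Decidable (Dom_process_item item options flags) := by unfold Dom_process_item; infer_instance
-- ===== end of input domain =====

-- ===== PORT A =====
-- B replaces the branching loop with two scaled aggregate sums (objective: simpler).
def process_item (item : Int) (options : List (String × Bool)) (flags : List (String × Bool)) : Int :=
  (PySem.List.pyRange 0 100 1).foldl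
    (fun total i =>
      if PySem.Int.mod i 2 == 0 then
        if (PySem.Dict.ofList options).getD "double" false then total + i * 2 else total + i
      else
        if (PySem.Dict.ofList flags).getD "triple" false then total + i * 3 else total + i)
    0

-- ===== PORT B =====
def process_item_alt (item : Int) (options : List (String × Bool)) (flags : List (String × Bool)) : Int :=
  let even_sum := (PySem.List.pyRange 0 100 2).foldl (· + ·) 0
  let odd_sum := (PySem.List.pyRange 1 100 2).foldl (· + ·) 0
  even_sum * (if (PySem.Dict.ofList options).getD "double" false then 2 else 1)
    + odd_sum * (if (PySem.Dict.ofList flags).getD "triple" false then 3 else 1)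

-- ===== PRECONDITION & SPEC =====
def Spec_process_item (item : Int) (options : List (String × Bool)) (flags : List (String × Bool)) (out : Int) : Prop := out = process_item_alt item options flags
instance (item : Int) (options : List (String × Bool)) (flags : List (String × Bool)) (out : Int) : Decidable (Spec_process_item item options flags out) := by unfold Spec_process_item; infer_instance

-- ===== CLAIM (what is proved, stated in full; the proofs are below) =====
def Claim_equal_process_item : Prop := ∀ (item : Int) (options : List (String × Bool)) (flags : List (String × Bool)), Dom_process_item item options flags → Spec_process_item item options flags (process_item item options flags)

-- ===== LEMMAS AND PROOFS =====

-- ===== VERDICT (by name: the statement is the Claim_ definition above) =====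
set_option maxRecDepth 4000 in
theorem process_item_spec : Claim_equal_process_item := by
  intro item options flags _
  unfold Spec_process_item
  cases hb : (PySem.Dict.ofList options).getD "double" false <;>
    cases ht : (PySem.Dict.ofList flags).getD "triple" false <;>
      simp only [process_item, process_item_alt, hb, ht] <;> decide
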